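-- pv_equiv track=rewrite | github.com/YOYOXUE/DataMining | HW2/SON.py | count_tuple
-- ===== SOURCE A (Python) =====
-- def count_tuple(tuples,baskets):
--     result={}
--     for i in tuples:
--         result[i]=0
--     for basket in baskets:
--         for t in result.keys():
--             if set(t).issubset(set(basket)):
--                 result[t]=result[t]+1
--     return result
-- ===== SOURCE B (Python) =====
-- def count_tuple(tuples, baskets):
--     # inverted index: element -> ids of candidate tuples containing it; per basket,
--     # tally how many distinct elements of each candidate appear, instead of
--     # testing every candidate against every basket.
--     result = {}
--     for t in tuples:
--         result[t] = 0
--     cands = list(result)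
--     need = [len(set(t)) for t in cands]
--     index = {}
--     for i, t in enumerate(cands):
--         for e in set(t):
--             index.setdefault(e, []).append(i)
--     for basket in baskets:
--         tally = {}
--         for e in set(basket):
--             for i in index.get(e, []):
--                 tally[i] = tally.get(i, 0) + 1
--         for i, c in tally.items():
--             if c == need[i]:
--                 result[cands[i]] += 1
--     # the empty tuple is a subset of every basket
--     nb = len(baskets)
--     for t in result:
--         if not t:
--             result[t] = nb
--     return result
-- ===== Notes on version B (the rewrite author's own statement) =====
-- stated objective: faster
-- what changed: Replaces the per-basket scan over all candidate tuples with subset tests by an inverted index from elements to candidate ids: each basket walks its distinct elements once, tallies per-id hits through the index, and increments a candidate exactly when its tally reaches its distinct-element count; the empty tuple gets the basket total in a final pass.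
import Mathlib
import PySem

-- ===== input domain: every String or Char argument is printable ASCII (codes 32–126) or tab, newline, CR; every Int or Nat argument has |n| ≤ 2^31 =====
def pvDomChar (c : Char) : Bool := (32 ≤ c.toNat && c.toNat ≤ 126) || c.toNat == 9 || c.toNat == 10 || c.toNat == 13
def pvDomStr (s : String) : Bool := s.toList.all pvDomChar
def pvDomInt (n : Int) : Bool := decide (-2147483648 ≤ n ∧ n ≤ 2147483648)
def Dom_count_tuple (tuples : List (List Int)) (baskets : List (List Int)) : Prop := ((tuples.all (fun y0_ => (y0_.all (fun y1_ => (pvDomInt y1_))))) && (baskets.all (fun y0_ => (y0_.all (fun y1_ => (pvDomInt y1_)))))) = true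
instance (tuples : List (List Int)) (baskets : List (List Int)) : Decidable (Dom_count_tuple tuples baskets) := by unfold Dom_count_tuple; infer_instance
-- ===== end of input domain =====

-- B replaces A's per-basket subset test over every candidate by an inverted index
-- (element -> candidates) plus per-basket tallies of matched distinct elements;
-- objective: faster (per basket only candidates sharing an element are touched).

-- ===== PORT A =====
def count_tuple (tuples : List (List Int)) (baskets : List (List Int)) : List (List Int × Int) :=
  let result : PySem.Dict (List Int) Int :=
    tuples.foldl (fun d i => d.insert i 0) PySem.Dict.empty
  let result :=
    baskets.foldl (fun d basket =>
      d.keys.foldl (fun d' t =>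
        if PySem.Set.issubset (PySem.Set.ofList t) (PySem.Set.ofList basket)
        then d'.modify t 0 (· + 1) else d') d) result
  result.items

-- ===== PORT B =====
-- tally = {}; for e in set(basket): for i in index.get(e, []): tally[i] = tally.get(i, 0) + 1
def pvTallyB (index : PySem.Dict Int (List Int)) (basket : List Int) :
    PySem.Dict Int Int :=
  (PySem.Set.ofList basket).foldl (fun d e =>
    (index.getD e []).foldl (fun d' i => d'.insert i (d'.getD i 0 + 1)) d) PySem.Dict.empty

-- for i, c in tally.items(): if c == need[i]: result[cands[i]] += 1
-- (every tally key is an id appended by the enumerate loop, hence 0 <= i < len(cands);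
--  pyGetD is exact there)
def pvStepB (index : PySem.Dict Int (List Int)) (need : List Int) (cands : List (List Int))
    (r : PySem.Dict (List Int) Int) (basket : List Int) : PySem.Dict (List Int) Int :=
  (pvTallyB index basket).items.foldl
    (fun r ic => if ic.2 = PySem.List.pyGetD need ic.1 0
      then r.modify (PySem.List.pyGetD cands ic.1 []) 0 (· + 1) else r) r

def count_tuple_alt (tuples : List (List Int)) (baskets : List (List Int)) : List (List Int × Int) :=
  let result : PySem.Dict (List Int) Int :=
    tuples.foldl (fun d t => d.insert t 0) PySem.Dict.empty
  let cands := result.keys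
  -- need = [len(set(t)) for t in cands]
  let need : List Int := cands.map (fun t => ((PySem.Set.ofList t).length : Int))
  -- for i, t in enumerate(cands): for e in set(t): index.setdefault(e, []).append(i)
  let index : PySem.Dict Int (List Int) :=
    (PySem.List.enumerate cands).foldl (fun d it =>
      (PySem.Set.ofList it.2).foldl (fun d' e => d'.insert e (d'.getD e [] ++ [it.1])) d)
      PySem.Dict.empty
  let result := baskets.foldl (pvStepB index need cands) result
  -- nb = len(baskets); for t in result: if not t: result[t] = nb
  let nb : Int := (baskets.length : Int)
  let result2 := result.keys.foldl (fun r t => if t.isEmpty then r.insert t nb else r) result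
  result2.items

-- ===== PRECONDITION & SPEC =====
def Spec_count_tuple (tuples : List (List Int)) (baskets : List (List Int)) (out : List (List Int × Int)) : Prop := out = count_tuple_alt tuples baskets
instance (tuples : List (List Int)) (baskets : List (List Int)) (out : List (List Int × Int)) : Decidable (Spec_count_tuple tuples baskets out) := by unfold Spec_count_tuple; infer_instance

-- ===== CLAIM (what is proved, stated in full; the proofs are below) =====
def Claim_equal_count_tuple : Prop := ∀ (tuples : List (List Int)) (baskets : List (List Int)), Dom_count_tuple tuples baskets → Spec_count_tuple tuples baskets (count_tuple tuples baskets)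

-- ===== LEMMAS AND PROOFS =====

-- A-side: value of the init loop: every key maps to 0
theorem pv_init_getD (l : List (List Int)) (d : PySem.Dict (List Int) Int)
    (h : ∀ k, d.getD k 0 = 0) (k : List Int) :
    (l.foldl (fun d i => d.insert i 0) d).getD k 0 = 0 := by
  induction l generalizing d with
  | nil => exact h k
  | cons a l ih =>
      simp only [List.foldl_cons]
      exact ih _ (fun k' => by rw [PySem.Dict.getD_insert]; split_ifs <;> simp [h])

-- a pass bumping keys ks under a condition: value at k gains (count of k in ks) when c k holds
theorem pv_bump_getD (c : List Int → Prop) [DecidablePred c] (ks : List (List Int))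
    (d : PySem.Dict (List Int) Int) (k : List Int) :
    (ks.foldl (fun d' t => if c t then d'.modify t 0 (· + 1) else d') d).getD k 0
      = d.getD k 0 + (if c k then (ks.count k : Int) else 0) := by
  induction ks generalizing d with
  | nil => simp
  | cons a ks ih =>
      simp only [List.foldl_cons]
      rw [ih]
      by_cases hca : c a
      · simp only [hca, if_true]
        rw [PySem.Dict.getD_modify]
        by_cases hk : k = a
        · subst hk
          simp [hca]
          ring
        · have hk' : a ≠ k := fun h => hk h.symm
          simp [hk, hk']
      · simp only [hca]
        by_cases hk : k = a
        · subst hk; simp [hca]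
        · have hk' : a ≠ k := fun h => hk h.symm
          simp [hk']

-- the same pass keeps the key list unchanged when every iterated key is present
theorem pv_bump_keys (c : List Int → Prop) [DecidablePred c] (ks : List (List Int))
    (d : PySem.Dict (List Int) Int) (h : ∀ t ∈ ks, t ∈ d.keys) :
    (ks.foldl (fun d' t => if c t then d'.modify t 0 (· + 1) else d') d).keys = d.keys := by
  induction ks generalizing d with
  | nil => rfl
  | cons a ks ih =>
      simp only [List.foldl_cons]
      by_cases hca : c a
      · have hmem : a ∈ d.keys := h a (by simp)
        have hkeys : (d.modify a 0 (· + 1)).keys = d.keys := by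
          rw [PySem.Dict.keys_modify]
          exact PySem.Dict.keys_insert_of_contains d _
            ((PySem.Dict.contains_iff_mem_keys d a).2 hmem)
        simp only [hca, if_true]
        rw [ih _ (fun t ht => by rw [hkeys]; exact h t (by simp [ht])), hkeys]
      · simp only [hca]
        exact ih _ (fun t ht => h t (by simp [ht]))

-- A-side outer loop: keys unchanged
theorem pv_outer_keys (c : List Int → List Int → Bool) (bs : List (List Int))
    (d : PySem.Dict (List Int) Int) :
    (bs.foldl (fun d basket =>
        d.keys.foldl (fun d' t => if c t basket then d'.modify t 0 (· + 1) else d') d) d).keys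
      = d.keys := by
  induction bs generalizing d with
  | nil => rfl
  | cons b bs ih =>
      simp only [List.foldl_cons]
      rw [ih, pv_bump_keys]
      intro t ht; exact ht

-- A-side outer loop: value at a present key is the initial value plus the 0/1 sum over baskets
theorem pv_outer_getD (c : List Int → List Int → Bool) (bs : List (List Int))
    (d : PySem.Dict (List Int) Int) (hnd : d.keys.Nodup) (k : List Int) :
    (bs.foldl (fun d basket =>
        d.keys.foldl (fun d' t => if c t basket then d'.modify t 0 (· + 1) else d') d) d).getD k 0
      = d.getD k 0 +
        (if k ∈ d.keys then (bs.map (fun b => if c k b then (1 : Int) else 0)).sum else 0) := by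
  induction bs generalizing d with
  | nil => simp
  | cons b bs ih =>
      simp only [List.foldl_cons]
      have hkeys := pv_bump_keys (fun t => c t b = true) d.keys d (fun _ ht => ht)
      rw [ih _ (by rw [hkeys]; exact hnd), hkeys, pv_bump_getD]
      by_cases hk : k ∈ d.keys
      · rw [List.count_eq_one_of_mem hnd hk]
        simp only [hk, if_true, List.map_cons, List.sum_cons]
        split_ifs <;> push_cast <;> ring
      · rw [List.count_eq_zero_of_not_mem hk]
        simp [hk]

-- B-side: membership in Python's enumerate
theorem pv_enum_mem_iff (xs : List (List Int)) (s : Int) (i : Int) (t : List Int) :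
    ((i, t) ∈ PySem.List.enumerate xs s) ↔ ∃ n : Nat, i = s + (n : Int) ∧ xs[n]? = some t := by
  induction xs generalizing s with
  | nil => simp [PySem.List.enumerate]
  | cons a xs ih =>
      simp only [PySem.List.enumerate, List.mem_cons, ih, Prod.mk.injEq]
      constructor
      · rintro (⟨rfl, rfl⟩ | ⟨n, rfl, hn⟩)
        · exact ⟨0, by simp⟩
        · exact ⟨n + 1, ⟨by push_cast; ring, by simpa using hn⟩⟩
      · rintro ⟨n, rfl, hn⟩
        cases n with
        | zero => exact Or.inl ⟨by simp, by simpa using hn.symm⟩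
        | succ n =>
            refine Or.inr ⟨n, by push_cast; ring, by simpa using hn⟩

theorem pv_enum_fst_nodup (xs : List (List Int)) (s : Int) :
    ((PySem.List.enumerate xs s).map Prod.fst).Nodup := by
  induction xs generalizing s with
  | nil => simp [PySem.List.enumerate]
  | cons a xs ih =>
      simp only [PySem.List.enumerate, List.map_cons, List.nodup_cons]
      refine ⟨?_, ih (s + 1)⟩
      intro hmem
      obtain ⟨⟨i, t⟩, hpt, hfst⟩ := List.mem_map.1 hmem
      obtain ⟨n, hn, -⟩ := (pv_enum_mem_iff xs (s + 1) i t).1 hpt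
      simp only at hfst
      omega

-- B-side: inner index pass over the elements of one candidate
theorem pv_idx_inner (i : Int) (es : List Int) (d : PySem.Dict Int (List Int))
    (e : Int) :
    (es.foldl (fun d' e' => d'.insert e' (d'.getD e' [] ++ [i])) d).getD e []
      = d.getD e [] ++ List.replicate (es.count e) i := by
  induction es generalizing d with
  | nil => simp
  | cons a es ih =>
      simp only [List.foldl_cons]
      rw [ih, PySem.Dict.getD_insert]
      by_cases he : e = a
      · subst he
        simp [List.count_cons_self, List.replicate_succ]
      · have : a ≠ e := fun h => he h.symm
        simp [he, List.count_cons_of_ne this]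

-- B-side: the built index lists, per element, the ids of candidates containing it (in order)
theorem pv_idx_getD (ps : List (Int × List Int)) (d : PySem.Dict Int (List Int)) (e : Int) :
    (ps.foldl (fun d it =>
        (PySem.Set.ofList it.2).foldl (fun d' e' => d'.insert e' (d'.getD e' [] ++ [it.1])) d)
        d).getD e []
      = d.getD e [] ++ (ps.filter (fun it => decide (e ∈ PySem.Set.ofList it.2))).map Prod.fst := by
  induction ps generalizing d with
  | nil => simp
  | cons p ps ih =>
      simp only [List.foldl_cons, List.filter_cons]
      rw [ih, pv_idx_inner]
      by_cases he : e ∈ PySem.Set.ofList p.2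
      · rw [List.count_eq_one_of_mem (PySem.Set.nodup_ofList p.2) he]
        simp [he]
      · rw [List.count_eq_zero_of_not_mem he]
        simp [he]

-- B-side: value of the per-basket tally
theorem pv_tally_getD (g : Int → List Int) (bs : List Int)
    (d : PySem.Dict Int Int) (k : Int) :
    (bs.foldl (fun d e => (g e).foldl (fun d' i => d'.insert i (d'.getD i 0 + 1)) d) d).getD k 0
      = d.getD k 0 + (bs.map (fun e => ((g e).count k : Int))).sum := by
  induction bs generalizing d with
  | nil => simp
  | cons a bs ih =>
      simp only [List.foldl_cons, List.map_cons, List.sum_cons]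
      rw [ih, PySem.Dict.getD_foldl_insert_add_one]
      ring

-- B-side: keys of the per-basket tally
theorem pv_tally_keys_mem (g : Int → List Int) (bs : List Int)
    (d : PySem.Dict Int Int) (k : Int) :
    (k ∈ (bs.foldl (fun d e =>
        (g e).foldl (fun d' i => d'.insert i (d'.getD i 0 + 1)) d) d).keys)
      ↔ k ∈ d.keys ∨ ∃ e ∈ bs, k ∈ g e := by
  induction bs generalizing d with
  | nil => simp
  | cons a bs ih =>
      simp only [List.foldl_cons]
      rw [ih, PySem.Dict.keys_foldl_insert, PySem.Set.mem_update]
      constructor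
      · rintro (⟨h | h⟩ | ⟨e, he, hk⟩)
        · exact Or.inl h
        · exact Or.inr ⟨a, by simp, h⟩
        · exact Or.inr ⟨e, by simp [he], hk⟩
      · rintro (h | ⟨e, he, hk⟩)
        · exact Or.inl (Or.inl h)
        · rcases List.mem_cons.1 he with rfl | he'
          · exact Or.inl (Or.inr hk)
          · exact Or.inr ⟨e, he', hk⟩

theorem pv_tally_keys_nodup (g : Int → List Int) (bs : List Int)
    (d : PySem.Dict Int Int) (h : d.keys.Nodup) :
    (bs.foldl (fun d e =>
        (g e).foldl (fun d' i => d'.insert i (d'.getD i 0 + 1)) d) d).keys.Nodup := by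
  induction bs generalizing d with
  | nil => exact h
  | cons a bs ih =>
      simp only [List.foldl_cons]
      exact ih _ (PySem.Dict.nodup_keys_foldl_insert _ _ _ h)

theorem pvTallyB_keys_nodup (index : PySem.Dict Int (List Int)) (basket : List Int) :
    (pvTallyB index basket).keys.Nodup := by
  unfold pvTallyB
  exact pv_tally_keys_nodup _ _ _ (by simp)

-- a pass over ids bumping the mapped key g i under a condition
theorem pv_bumpg_getD (c : Int → Prop) [DecidablePred c] (g : Int → List Int) (ks : List Int)
    (d : PySem.Dict (List Int) Int) (k : List Int) :
    (ks.foldl (fun d' i => if c i then d'.modify (g i) 0 (· + 1) else d') d).getD k 0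
      = d.getD k 0 + ((ks.countP (fun i => decide (c i ∧ g i = k))) : Int) := by
  induction ks generalizing d with
  | nil => simp
  | cons a ks ih =>
      simp only [List.foldl_cons, List.countP_cons]
      rw [ih]
      by_cases hca : c a
      · simp only [hca, if_true]
        rw [PySem.Dict.getD_modify]
        by_cases hk : k = g a
        · subst hk
          simp [hca]
          ring
        · have hk' : g a ≠ k := fun h => hk h.symm
          simp [hk, hk']
      · simp [hca]

theorem pv_bumpg_keys (c : Int → Prop) [DecidablePred c] (g : Int → List Int) (ks : List Int)
    (d : PySem.Dict (List Int) Int) (h : ∀ i ∈ ks, g i ∈ d.keys) :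
    (ks.foldl (fun d' i => if c i then d'.modify (g i) 0 (· + 1) else d') d).keys = d.keys := by
  induction ks generalizing d with
  | nil => rfl
  | cons a ks ih =>
      simp only [List.foldl_cons]
      by_cases hca : c a
      · have hmem : g a ∈ d.keys := h a (by simp)
        have hkeys : (d.modify (g a) 0 (· + 1)).keys = d.keys := by
          rw [PySem.Dict.keys_modify]
          exact PySem.Dict.keys_insert_of_contains d _
            ((PySem.Dict.contains_iff_mem_keys d (g a)).2 hmem)
        simp only [hca, if_true]
        rw [ih _ (fun i hi => by rw [hkeys]; exact h i (by simp [hi])), hkeys]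
      · simp only [hca]
        exact ih _ (fun i hi => h i (by simp [hi]))

-- a fixed count of members matching one id
theorem pv_countP_eq_single (c : Int → Prop) [DecidablePred c] (ik : Int) :
    ∀ l : List Int, l.Nodup →
      ((l.countP (fun i => decide (c i ∧ i = ik))) : Int) = if ik ∈ l ∧ c ik then 1 else 0 := by
  intro l
  induction l with
  | nil => intro _; simp
  | cons a l ih =>
      intro hl
      obtain ⟨hna, hnd⟩ := List.nodup_cons.1 hl
      have hrec := ih hnd
      by_cases ha : a = ik
      · subst ha
        have hz : l.countP (fun i => decide (c i ∧ i = a)) = 0 :=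
          List.countP_eq_zero.2 (fun i hi => by
            simp only [decide_eq_true_eq]
            rintro ⟨-, rfl⟩
            exact hna hi)
        by_cases hc : c a
        · simp only [List.countP_cons, hz, List.mem_cons]
          simp [hc, List.mem_cons]
        · simp only [List.countP_cons, hz]
          simp [hc]
      · have hpa : ¬ (c a ∧ a = ik) := fun h => ha h.2
        have hmem : (ik ∈ a :: l ∧ c ik) ↔ (ik ∈ l ∧ c ik) := by
          constructor
          · rintro ⟨hm, hc⟩
            exact ⟨(List.mem_cons.1 hm).resolve_left (fun he => ha he.symm), hc⟩
          · rintro ⟨hm, hc⟩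
            exact ⟨List.mem_cons.2 (Or.inr hm), hc⟩
        calc ((List.countP (fun i => decide (c i ∧ i = ik)) (a :: l) : Nat) : Int)
            = ((l.countP (fun i => decide (c i ∧ i = ik)) : Nat) : Int) := by
              simp [List.countP_cons, hpa]
          _ = if ik ∈ l ∧ c ik then 1 else 0 := hrec
          _ = if ik ∈ a :: l ∧ c ik then 1 else 0 := by simp only [hmem]

-- pvStepB preserves keys (each tally id maps to a present key)
theorem pv_stepB_keys (index : PySem.Dict Int (List Int)) (need : List Int)
    (cands : List (List Int)) (r : PySem.Dict (List Int) Int) (basket : List Int)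
    (h : ∀ i ∈ (pvTallyB index basket).keys, PySem.List.pyGetD cands i [] ∈ r.keys) :
    (pvStepB index need cands r basket).keys = r.keys := by
  unfold pvStepB
  rw [PySem.Dict.items_eq_map_keys (pvTallyB index basket) (pvTallyB_keys_nodup index basket) 0,
      List.foldl_map]
  exact pv_bumpg_keys (fun i => (pvTallyB index basket).getD i 0 = PySem.List.pyGetD need i 0)
    (fun i => PySem.List.pyGetD cands i []) _ r h

-- pvStepB value at a tuple key k
theorem pv_stepB_getD (index : PySem.Dict Int (List Int)) (need : List Int)
    (cands : List (List Int)) (r : PySem.Dict (List Int) Int) (basket : List Int)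
    (k : List Int) :
    (pvStepB index need cands r basket).getD k 0
      = r.getD k 0 +
        (((pvTallyB index basket).keys.countP (fun i =>
            decide ((pvTallyB index basket).getD i 0 = PySem.List.pyGetD need i 0 ∧
              PySem.List.pyGetD cands i [] = k))) : Int) := by
  unfold pvStepB
  rw [PySem.Dict.items_eq_map_keys (pvTallyB index basket) (pvTallyB_keys_nodup index basket) 0,
      List.foldl_map]
  exact pv_bumpg_getD (fun i => (pvTallyB index basket).getD i 0 = PySem.List.pyGetD need i 0)
    (fun i => PySem.List.pyGetD cands i []) _ r k

-- B-side outer loop over baskets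
theorem pv_Bouter_keys (index : PySem.Dict Int (List Int)) (need : List Int)
    (cands : List (List Int)) (r : PySem.Dict (List Int) Int) (bs : List (List Int))
    (h : ∀ basket, ∀ i ∈ (pvTallyB index basket).keys, PySem.List.pyGetD cands i [] ∈ r.keys) :
    (bs.foldl (pvStepB index need cands) r).keys = r.keys := by
  induction bs generalizing r with
  | nil => rfl
  | cons b bs ih =>
      simp only [List.foldl_cons]
      have hk := pv_stepB_keys index need cands r b (h b)
      rw [ih _ (fun basket i hi => by rw [hk]; exact h basket i hi), hk]

theorem pv_Bouter_getD (index : PySem.Dict Int (List Int)) (need : List Int)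
    (cands : List (List Int)) (r : PySem.Dict (List Int) Int) (bs : List (List Int))
    (k : List Int) :
    (bs.foldl (pvStepB index need cands) r).getD k 0
      = r.getD k 0 +
        (bs.map (fun b => (((pvTallyB index b).keys.countP (fun i =>
            decide ((pvTallyB index b).getD i 0 = PySem.List.pyGetD need i 0 ∧
              PySem.List.pyGetD cands i [] = k))) : Int))).sum := by
  induction bs generalizing r with
  | nil => simp
  | cons b bs ih =>
      simp only [List.foldl_cons, List.map_cons, List.sum_cons]
      rw [ih, pv_stepB_getD]
      ring

-- B-side final pass: keys unchanged, empty key set to nb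
theorem pv_fin_keys (nb : Int) (ks : List (List Int)) (r : PySem.Dict (List Int) Int)
    (h : ∀ t ∈ ks, t ∈ r.keys) :
    (ks.foldl (fun r t => if t.isEmpty then r.insert t nb else r) r).keys = r.keys := by
  induction ks generalizing r with
  | nil => rfl
  | cons a ks ih =>
      simp only [List.foldl_cons]
      by_cases ha : a.isEmpty
      · have hkeys : (r.insert a nb).keys = r.keys :=
          PySem.Dict.keys_insert_of_contains r _
            ((PySem.Dict.contains_iff_mem_keys r a).2 (h a (by simp)))
        simp only [ha, if_true]
        rw [ih _ (fun t ht => by rw [hkeys]; exact h t (by simp [ht])), hkeys]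
      · simp only [ha]
        exact ih _ (fun t ht => h t (by simp [ht]))

theorem pv_fin_getD (nb : Int) (ks : List (List Int)) (r : PySem.Dict (List Int) Int)
    (k : List Int) :
    (ks.foldl (fun r t => if t.isEmpty then r.insert t nb else r) r).getD k 0
      = if k ∈ ks ∧ k = [] then nb else r.getD k 0 := by
  induction ks generalizing r with
  | nil => simp
  | cons a ks ih =>
      simp only [List.foldl_cons]
      by_cases ha : a.isEmpty
      · have ha' : a = [] := by simpa [List.isEmpty_iff] using ha
        subst ha'
        simp only [List.isEmpty_nil, if_true]
        rw [ih]
        by_cases hke : k = []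
        · subst hke
          split_ifs <;> simp_all [List.mem_cons]
        · simp [hke, PySem.Dict.getD_insert]
      · have ha' : a ≠ [] := by simpa [List.isEmpty_iff] using ha
        simp only [ha, if_false, Bool.false_eq_true]
        rw [ih]
        by_cases hke : k = []
        · subst hke
          have hne : ¬ (([] : List Int) = a) := fun h => ha' h.symm
          simp [List.mem_cons, hne]
        · simp [hke]

-- counting matched distinct elements characterises the subset test
theorem pv_count_iff_subset (s bs : List Int) (hs : s.Nodup) (hbs : bs.Nodup) (hne : s ≠ []) :
    ((∃ e ∈ bs, e ∈ s) ∧ (bs.countP (fun e => decide (e ∈ s)) : Int) = (s.length : Int))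
      ↔ ∀ x ∈ s, x ∈ bs := by
  constructor
  · rintro ⟨-, hlen⟩ x hx
    have hlen' : bs.countP (fun e => decide (e ∈ s)) = s.length := by exact_mod_cast hlen
    have hfil : bs.filter (fun e => decide (e ∈ s)) ⊆ s := fun y hy => by
      simpa using List.of_mem_filter hy
    have hsub : (bs.filter (fun e => decide (e ∈ s))).Subperm s :=
      (hbs.filter _).subperm hfil
    have hperm : (bs.filter (fun e => decide (e ∈ s))).Perm s :=
      hsub.perm_of_length_le (by rw [← List.countP_eq_length_filter, hlen'])
    have hxf : x ∈ bs.filter (fun e => decide (e ∈ s)) := (hperm.mem_iff).2 hx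
    exact List.mem_of_mem_filter hxf
  · intro h
    refine ⟨?_, ?_⟩
    · obtain ⟨a, ha⟩ := List.exists_mem_of_ne_nil s hne
      exact ⟨a, h a ha, ha⟩
    · have hsub1 : (bs.filter (fun e => decide (e ∈ s))).Subperm s :=
        (hbs.filter _).subperm (fun y hy => by simpa using List.of_mem_filter hy)
      have hsub2 : s.Subperm (bs.filter (fun e => decide (e ∈ s))) :=
        hs.subperm (fun y hy => List.mem_filter.2 ⟨h y hy, by simpa using hy⟩)
      have : bs.countP (fun e => decide (e ∈ s)) = s.length := by
        rw [List.countP_eq_length_filter]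
        exact le_antisymm hsub1.length_le hsub2.length_le
      exact_mod_cast this

-- ===== VERDICT (by name: the statement is the Claim_ definition above) =====
theorem count_tuple_spec : Claim_equal_count_tuple := by
  intro tuples baskets _
  unfold Spec_count_tuple count_tuple count_tuple_alt
  simp only []
  set K := PySem.Set.ofList tuples with hK
  set sub : List Int → List Int → Bool :=
    fun t b => PySem.Set.issubset (PySem.Set.ofList t) (PySem.Set.ofList b) with hsub
  set d0 : PySem.Dict (List Int) Int :=
    tuples.foldl (fun d i => d.insert i 0) PySem.Dict.empty with hd0
  have hkeys0 : d0.keys = K := by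
    rw [hd0, PySem.Dict.keys_foldl_insert tuples (fun _ _ => (0 : Int)), PySem.Dict.keys_empty]
    rfl
  have hnd0 : d0.keys.Nodup := by
    rw [hd0]
    exact PySem.Dict.nodup_keys_foldl_insert tuples (fun _ _ => (0 : Int)) _
      PySem.Dict.nodup_keys_empty
  have hndK : K.Nodup := hkeys0 ▸ hnd0
  have h0 : ∀ k, d0.getD k 0 = 0 := by
    intro k
    rw [hd0]
    exact pv_init_getD tuples _ (fun k' => PySem.Dict.getD_empty k' 0) k
  rw [hkeys0]
  set need : List Int := K.map (fun t => ((PySem.Set.ofList t).length : Int)) with hneedL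
  set ps := PySem.List.enumerate K 0 with hps
  set index : PySem.Dict Int (List Int) :=
    ps.foldl (fun d it =>
      (PySem.Set.ofList it.2).foldl (fun d' e => d'.insert e (d'.getD e [] ++ [it.1])) d)
      PySem.Dict.empty with hindex
  have hidxD : ∀ e, index.getD e [] =
      (ps.filter (fun it => decide (e ∈ PySem.Set.ofList it.2))).map Prod.fst := by
    intro e
    rw [hindex, pv_idx_getD, PySem.Dict.getD_empty, List.nil_append]
  have hmem_ps : ∀ (i : Int) (t : List Int),
      ((i, t) ∈ ps) ↔ ∃ n : Nat, i = (n : Int) ∧ K[n]? = some t := by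
    intro i t
    rw [hps]
    simpa using pv_enum_mem_iff K 0 i t
  have hfst_nd : (ps.map Prod.fst).Nodup := by rw [hps]; exact pv_enum_fst_nodup K 0
  have hsnd_mem : ∀ p ∈ ps, p.2 ∈ K := by
    intro p hp
    obtain ⟨n, -, hn⟩ := (hmem_ps p.1 p.2).1 hp
    exact List.mem_of_getElem? hn
  have hget_c : ∀ p ∈ ps, PySem.List.pyGetD K p.1 [] = p.2 := by
    intro p hp
    obtain ⟨n, h1, hn⟩ := (hmem_ps p.1 p.2).1 hp
    obtain ⟨hlt, hv⟩ := List.getElem?_eq_some_iff.1 hn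
    rw [h1, PySem.List.pyGetD_eq_getElem K [] (Int.natCast_nonneg n) (by exact_mod_cast hlt)]
    simpa [Int.toNat_natCast] using hv
  have hget_need : ∀ p ∈ ps,
      PySem.List.pyGetD need p.1 0 = ((PySem.Set.ofList p.2).length : Int) := by
    intro p hp
    obtain ⟨n, h1, hn⟩ := (hmem_ps p.1 p.2).1 hp
    obtain ⟨hlt, hv⟩ := List.getElem?_eq_some_iff.1 hn
    rw [hneedL, h1, PySem.List.pyGetD_eq_getElem _ _ (Int.natCast_nonneg n)
      (by simpa using (by exact_mod_cast hlt : (n : Int) < (K.length : Int)))]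
    simp [Int.toNat_natCast, hv]
  have hfst_inj : ∀ p ∈ ps, ∀ q ∈ ps, p.1 = q.1 → p = q := by
    intro p hp q hq h
    obtain ⟨n, hn1, hn2⟩ := (hmem_ps p.1 p.2).1 hp
    obtain ⟨m, hm1, hm2⟩ := (hmem_ps q.1 q.2).1 hq
    have hnm : n = m := by omega
    subst hnm
    have : p.2 = q.2 := by
      rw [hn2] at hm2
      exact (Option.some.injEq _ _ ▸ hm2).symm ▸ (Option.some_inj.1 hm2).symm ▸ rfl
    exact Prod.ext (h ▸ rfl) this
  have hsnd_inj : ∀ p ∈ ps, ∀ q ∈ ps, p.2 = q.2 → p = q := by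
    intro p hp q hq h
    obtain ⟨n, hn1, hn2⟩ := (hmem_ps p.1 p.2).1 hp
    obtain ⟨m, hm1, hm2⟩ := (hmem_ps q.1 q.2).1 hq
    obtain ⟨hltn, hvn⟩ := List.getElem?_eq_some_iff.1 hn2
    obtain ⟨hltm, hvm⟩ := List.getElem?_eq_some_iff.1 hm2
    have hnm : n = m := by
      refine (hndK.getElem_inj_iff (hi := hltn) (hj := hltm)).1 ?_
      rw [hvn, hvm, h]
    subst hnm
    exact Prod.ext (by omega) h
  have hTid : ∀ basket i, i ∈ (pvTallyB index basket).keys → ∃ p ∈ ps, p.1 = i := by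
    intro basket i hi
    unfold pvTallyB at hi
    rcases (pv_tally_keys_mem _ _ _ i).1 hi with h | ⟨e, -, hk⟩
    · simp [PySem.Dict.keys_empty] at h
    · rw [hidxD] at hk
      obtain ⟨p, hp, hpe⟩ := List.mem_map.1 hk
      exact ⟨p, List.mem_of_mem_filter hp, hpe⟩
  have hTsub : ∀ basket, ∀ i ∈ (pvTallyB index basket).keys,
      PySem.List.pyGetD K i [] ∈ K := by
    intro basket i hi
    obtain ⟨p, hp, hpi⟩ := hTid basket i hi
    rw [← hpi, hget_c p hp]
    exact hsnd_mem p hp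
  set rB := baskets.foldl (pvStepB index need K) d0 with hrB
  have hkeysB : rB.keys = K := by
    rw [hrB, pv_Bouter_keys _ _ _ _ _
        (fun basket i hi => by rw [hkeys0]; exact hTsub basket i hi), hkeys0]
  set nb : Int := (baskets.length : Int) with hnb
  set r2 := rB.keys.foldl (fun r t => if t.isEmpty then r.insert t nb else r) rB with hr2
  have hkeys2 : r2.keys = K := by
    rw [hr2, pv_fin_keys _ _ _ (fun t ht => ht), hkeysB]
  have hnd2 : r2.keys.Nodup := by rw [hkeys2]; exact hndK
  set dF := baskets.foldl (fun d basket =>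
      d.keys.foldl (fun d' t => if sub t basket then d'.modify t 0 (· + 1) else d') d) d0 with hdF
  have hkeysF : dF.keys = K := by rw [hdF, pv_outer_keys, hkeys0]
  have hndF : dF.keys.Nodup := by rw [hkeysF]; exact hndK
  rw [PySem.Dict.items_eq_map_keys dF hndF 0, PySem.Dict.items_eq_map_keys r2 hnd2 0,
      hkeysF, hkeys2]
  refine List.map_congr_left (fun k hk => ?_)
  simp only [Prod.mk.injEq, true_and]
  have hA : dF.getD k 0 = (baskets.map (fun b => if sub k b then (1 : Int) else 0)).sum := by
    rw [hdF, pv_outer_getD sub baskets d0 hnd0 k, h0, hkeys0, if_pos hk]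
    ring
  have hB : r2.getD k 0 = if k = [] then nb else
      (baskets.map (fun b => (((pvTallyB index b).keys.countP (fun i =>
          decide ((pvTallyB index b).getD i 0 = PySem.List.pyGetD need i 0 ∧
            PySem.List.pyGetD K i [] = k))) : Int))).sum := by
    rw [hr2, pv_fin_getD, hkeysB, hrB, pv_Bouter_getD, h0, zero_add]
    by_cases hke : k = []
    · rw [if_pos ⟨hk, hke⟩, if_pos hke]
    · rw [if_neg (fun h => hke h.2), if_neg hke]
  rw [hA, hB]
  by_cases hke : k = []
  · subst hke
    rw [if_pos rfl, hnb]
    have hall : ∀ b ∈ baskets, (if sub [] b then (1 : Int) else 0) = 1 := by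
      intro b _
      have hss : sub [] b = true := by
        rw [hsub]
        exact (PySem.Set.issubset_iff _ _).2 (by simp [PySem.Set.mem_ofList])
      simp [hss]
    rw [List.map_congr_left hall, PySem.List.sum_map_const_int]
    ring
  · rw [if_neg hke]
    refine congrArg List.sum (List.map_congr_left (fun b _ => ?_))
    have hsne : PySem.Set.ofList k ≠ [] := by
      obtain ⟨a, ha⟩ := List.exists_mem_of_ne_nil k hke
      exact List.ne_nil_of_mem ((PySem.Set.mem_ofList k a).2 ha)
    obtain ⟨nk, hnk⟩ := List.mem_iff_getElem?.1 hk
    set pk : Int × List Int := ((nk : Int), k) with hpkdef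
    have hpk : pk ∈ ps := (hmem_ps _ _).2 ⟨nk, rfl, hnk⟩
    -- mapped keys of the filtered index lists are duplicate-free
    have hfnd : ∀ e : Int,
        ((ps.filter (fun it => decide (e ∈ PySem.Set.ofList it.2))).map Prod.fst).Nodup :=
      fun e => (List.filter_sublist.map Prod.fst).nodup hfst_nd
    -- id membership in one index list
    have hidmem : ∀ (e : Int),
        (pk.1 ∈ (ps.filter (fun it => decide (e ∈ PySem.Set.ofList it.2))).map Prod.fst)
          ↔ e ∈ PySem.Set.ofList k := by
      intro e
      constructor
      · intro hm
        obtain ⟨q, hq, hq1⟩ := List.mem_map.1 hm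
        have hq' : q ∈ ps := List.mem_of_mem_filter hq
        have : q = pk := hfst_inj q hq' pk hpk hq1
        subst this
        simpa [hpkdef] using (List.mem_filter.1 hq).2
      · intro he
        exact List.mem_map.2 ⟨pk, List.mem_filter.2 ⟨hpk, by simpa [hpkdef] using he⟩, rfl⟩
    -- tally value at pk.1
    have htD : (pvTallyB index b).getD pk.1 0
        = (((PySem.Set.ofList b).countP (fun e => decide (e ∈ PySem.Set.ofList k))) : Int) := by
      unfold pvTallyB
      rw [pv_tally_getD, PySem.Dict.getD_empty, zero_add,
          ← PySem.List.sum_map_ite_one_zero (fun e => decide (e ∈ PySem.Set.ofList k))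
            (PySem.Set.ofList b)]
      refine congrArg List.sum (List.map_congr_left (fun e _ => ?_))
      rw [hidxD]
      by_cases he : e ∈ PySem.Set.ofList k
      · rw [List.count_eq_one_of_mem (hfnd e) ((hidmem e).2 he)]
        simp [he]
      · rw [List.count_eq_zero_of_not_mem (fun hm => he ((hidmem e).1 hm))]
        simp [he]
    -- id membership in the tally
    have htK : (pk.1 ∈ (pvTallyB index b).keys)
        ↔ ∃ e ∈ PySem.Set.ofList b, e ∈ PySem.Set.ofList k := by
      unfold pvTallyB
      rw [pv_tally_keys_mem]
      constructor
      · rintro (h | ⟨e, he, hmem⟩)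
        · simp [PySem.Dict.keys_empty] at h
        · rw [hidxD] at hmem
          exact ⟨e, he, (hidmem e).1 hmem⟩
      · rintro ⟨e, he, hes⟩
        refine Or.inr ⟨e, he, ?_⟩
        rw [hidxD]
        exact (hidmem e).2 hes
    -- only id pk.1 can bump key k
    have hcongr : (pvTallyB index b).keys.countP (fun i =>
          decide ((pvTallyB index b).getD i 0 = PySem.List.pyGetD need i 0 ∧
            PySem.List.pyGetD K i [] = k))
        = (pvTallyB index b).keys.countP (fun i =>
          decide ((pvTallyB index b).getD i 0 = PySem.List.pyGetD need i 0 ∧ i = pk.1)) := by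
      refine List.countP_congr (fun i hi => ?_)
      simp only [decide_eq_true_eq, and_congr_right_iff]
      intro _
      constructor
      · intro hg
        obtain ⟨p, hp, hpi⟩ := hTid b i hi
        have hp2 : p.2 = k := by rw [← hg, ← hpi, hget_c p hp]
        have : p = pk := hsnd_inj p hp pk hpk (by simpa [hpkdef] using hp2)
        rw [← hpi, this]
      · rintro rfl
        rw [hget_c pk hpk]
    rw [hcongr, pv_countP_eq_single _ _ _ (pvTallyB_keys_nodup index b)]
    have hneedpk : PySem.List.pyGetD need pk.1 0 = ((PySem.Set.ofList k).length : Int) :=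
      hget_need pk hpk
    have hcond : (pk.1 ∈ (pvTallyB index b).keys ∧
        (pvTallyB index b).getD pk.1 0 = PySem.List.pyGetD need pk.1 0) ↔ (sub k b = true) := by
      rw [htD, htK, hneedpk, hsub]
      simp only []
      rw [PySem.Set.issubset_iff]
      exact pv_count_iff_subset (PySem.Set.ofList k) (PySem.Set.ofList b)
        (PySem.Set.nodup_ofList k) (PySem.Set.nodup_ofList b) hsne
    rw [if_congr hcond rfl rfl]
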